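-- pv_equiv track=rewrite | github.com/irul11/Advent-of-Code-2024 | 2/solution.py | helper
-- ===== SOURCE A (Python) =====
-- def helper(arr):
--     if len(arr) <= 1:
--         return 1
--
--     isinc = arr[1] - arr[0] > 0
--     for i in range(1, len(arr)):
--         if not(isinc ^ (arr[i] - arr[i-1] > 0)) and 1 <= abs(arr[i] - arr[i - 1]) <= 3:
--             pass
--         else:
--             return 0
--
--     return 1
-- ===== SOURCE B (Python) =====
-- def helper(arr):
--     if len(arr) <= 1:
--         return 1
--     mn = mx = arr[1] - arr[0]
--     for a, b in zip(arr[1:], arr[2:]):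
--         d = b - a
--         if d < mn:
--             mn = d
--         if d > mx:
--             mx = d
--     return 1 if (1 <= mn and mx <= 3) or (-3 <= mn and mx <= -1) else 0
-- ===== Notes on version B (the rewrite author's own statement) =====
-- stated objective: alternative
-- what changed: Instead of testing each adjacent step against a direction flag (A) or each diff against range predicates, B computes only the minimum and maximum adjacent difference in one fold over zipped shifted lists and decides safety by two final interval comparisons on those extremes ([1,3] or [-3,-1]).
import Mathlib
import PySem

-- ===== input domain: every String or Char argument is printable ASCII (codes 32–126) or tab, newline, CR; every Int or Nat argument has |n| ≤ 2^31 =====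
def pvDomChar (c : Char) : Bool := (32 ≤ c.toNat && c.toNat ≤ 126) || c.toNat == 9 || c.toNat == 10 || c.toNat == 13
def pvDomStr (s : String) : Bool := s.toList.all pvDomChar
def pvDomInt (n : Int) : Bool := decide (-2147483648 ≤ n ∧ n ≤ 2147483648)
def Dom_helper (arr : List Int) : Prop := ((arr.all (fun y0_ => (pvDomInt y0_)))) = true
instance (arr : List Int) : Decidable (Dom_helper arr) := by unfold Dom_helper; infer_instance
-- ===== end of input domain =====

-- B replaces A's per-step direction-flag test by a single min/max fold over the zipped
-- shifted lists, deciding safety from the two extreme adjacent differences at the end.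

-- ===== PORT A =====
-- every index produced by range(1, len(arr)) (and i-1) is in range, so pyGetD's default 0 is never used
def helperLoop (arr : List Int) (isinc : Bool) : List Int → Int
  | [] => 1
  | i :: rest =>
    let d := PySem.List.pyGetD arr i 0 - PySem.List.pyGetD arr (i - 1) 0
    if (!(isinc ^^ decide (0 < d))) && (decide (1 ≤ |d|) && decide (|d| ≤ 3)) then
      helperLoop arr isinc rest
    else 0

def helper (arr : List Int) : Int :=
  if arr.length ≤ 1 then 1
  else
    let isinc := decide (0 < PySem.List.pyGetD arr 1 0 - PySem.List.pyGetD arr 0 0)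
    helperLoop arr isinc (PySem.List.pyRange 1 arr.length 1)

-- ===== PORT B =====
def helper_alt (arr : List Int) : Int :=
  if arr.length ≤ 1 then 1
  else
    let d0 := PySem.List.pyGetD arr 1 0 - PySem.List.pyGetD arr 0 0
    let p := ((PySem.List.slice arr (some 1) none).zip (PySem.List.slice arr (some 2) none)).foldl
      (fun (p : Int × Int) (ab : Int × Int) =>
        let d := ab.2 - ab.1
        (if d < p.1 then d else p.1, if d > p.2 then d else p.2)) (d0, d0)
    if (1 ≤ p.1 ∧ p.2 ≤ 3) ∨ (-3 ≤ p.1 ∧ p.2 ≤ -1) then 1 else 0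

-- ===== PRECONDITION & SPEC =====
def Spec_helper (arr : List Int) (out : Int) : Prop := out = helper_alt arr
instance (arr : List Int) (out : Int) : Decidable (Spec_helper arr out) := by unfold Spec_helper; infer_instance

-- ===== CLAIM =====
def Claim_equal_helper : Prop := ∀ (arr : List Int), Dom_helper arr → Spec_helper arr (helper arr)

-- ===== LEMMAS AND PROOFS =====

def pvDiff (arr : List Int) (i : Int) : Int :=
  PySem.List.pyGetD arr i 0 - PySem.List.pyGetD arr (i - 1) 0

-- the adjacent-difference list in B's (zip) form
def pvZd (L : List Int) : List Int := (L.zip L.tail).map (fun ab => ab.2 - ab.1)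


lemma helperLoop_eq_all (arr : List Int) (isinc : Bool) (L : List Int) :
    helperLoop arr isinc L =
      if (L.all (fun i =>
          (!(isinc ^^ decide (0 < pvDiff arr i))) &&
          (decide (1 ≤ |pvDiff arr i|) && decide (|pvDiff arr i| ≤ 3)))) = true then 1 else 0 := by
  induction L with
  | nil => simp [helperLoop]
  | cons i rest ih =>
    have hstep : helperLoop arr isinc (i :: rest) =
        if ((!(isinc ^^ decide (0 < pvDiff arr i))) &&
            (decide (1 ≤ |pvDiff arr i|) && decide (|pvDiff arr i| ≤ 3))) = true
        then helperLoop arr isinc rest else 0 := rfl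
    rw [hstep, List.all_cons, ih]
    by_cases h : ((!(isinc ^^ decide (0 < pvDiff arr i))) &&
        (decide (1 ≤ |pvDiff arr i|) && decide (|pvDiff arr i| ≤ 3))) = true
    · rw [if_pos h, h]; simp
    · rw [if_neg h]
      rw [Bool.not_eq_true] at h
      rw [h]; simp



-- diff lists of A's (indexed) and B's (zip) form agree
lemma diffs_eq (L : List Int) :
    (PySem.List.pyRange 1 (L.length : Int) 1).map (pvDiff L) = pvZd L := by
  induction L with
  | nil => simp [pvZd, PySem.List.pyRange_one_eq_nil]
  | cons a t ih =>
    cases t with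
    | nil => simp [pvZd, PySem.List.pyRange_one_eq_nil]
    | cons b t' =>
      have hlen : ((a :: b :: t').length : Int) = (t'.length : Int) + 2 := by
        simp; omega
      rw [hlen]
      have hcons : PySem.List.pyRange 1 ((t'.length : Int) + 2) 1
          = 1 :: PySem.List.pyRange 2 ((t'.length : Int) + 2) 1 := by
        rw [PySem.List.pyRange_one_cons (by omega)]; norm_num
      rw [hcons, List.map_cons]
      have hzd : pvZd (a :: b :: t') = (b - a) :: pvZd (b :: t') := rfl
      rw [hzd]
      congr 1
      · show pvDiff (a :: b :: t') 1 = b - a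
        have e1 : (1 : Int) = ((1 : Nat) : Int) := rfl
        have e0 : (1 : Int) - 1 = ((0 : Nat) : Int) := rfl
        rw [pvDiff, e0, e1, PySem.List.pyGetD_natCast, PySem.List.pyGetD_natCast]
        simp [List.getD]
      · -- shift the range by one and use ih on (b :: t')
        have hlen' : ((b :: t').length : Int) = (t'.length : Int) + 1 := by simp
        rw [← ih, hlen']
        rw [PySem.List.pyRange_one, PySem.List.pyRange_one]
        have h2 : ((t'.length : Int) + 2 - 2).toNat = t'.length := by omega
        have h1 : ((t'.length : Int) + 1 - 1).toNat = t'.length := by omega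
        rw [h1, h2, List.map_map, List.map_map]
        apply List.map_congr_left
        intro k hk
        simp only [Function.comp_apply, pvDiff]
        have e2 : (2 : Int) + (k : Int) = ((k + 2 : Nat) : Int) := by push_cast; ring
        have e1 : (1 : Int) + (k : Int) = ((k + 1 : Nat) : Int) := by push_cast; ring
        rw [e2, e1]
        have s2 : ((k + 2 : Nat) : Int) - 1 = ((k + 1 : Nat) : Int) := by push_cast; ring
        have s1 : ((k + 1 : Nat) : Int) - 1 = ((k : Nat) : Int) := by push_cast; ring
        rw [s2, s1]
        simp only [PySem.List.pyGetD_natCast]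
        simp [List.getD]

-- min/max fold characterisations
lemma foldl_minmax (L : List (Int × Int)) (m M : Int) :
    L.foldl (fun (p : Int × Int) (ab : Int × Int) =>
        let d := ab.2 - ab.1
        (if d < p.1 then d else p.1, if d > p.2 then d else p.2)) (m, M)
    = ((L.map (fun ab => ab.2 - ab.1)).foldl (fun m d => if d < m then d else m) m,
       (L.map (fun ab => ab.2 - ab.1)).foldl (fun M d => if d > M then d else M) M) := by
  induction L generalizing m M with
  | nil => rfl
  | cons ab rest ih => simp only [List.foldl_cons, List.map_cons, ih]

lemma le_foldl_min (c m : Int) (ds : List Int) :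
    (c ≤ ds.foldl (fun m d => if d < m then d else m) m) ↔ (c ≤ m ∧ ∀ d ∈ ds, c ≤ d) := by
  induction ds generalizing m with
  | nil => simp
  | cons d rest ih =>
    simp only [List.foldl_cons, ih, List.mem_cons]
    constructor
    · rintro ⟨h1, h2⟩
      split_ifs at h1 with h
      · exact ⟨by omega, fun x hx => by rcases hx with rfl | hx; omega; exact h2 x hx⟩
      · exact ⟨h1, fun x hx => by rcases hx with rfl | hx; omega; exact h2 x hx⟩
    · rintro ⟨h1, h2⟩
      refine ⟨?_, fun x hx => h2 x (Or.inr hx)⟩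
      have := h2 d (Or.inl rfl)
      split_ifs <;> omega
lemma foldl_max_le (c M : Int) (ds : List Int) :
    (ds.foldl (fun M d => if d > M then d else M) M ≤ c) ↔ (M ≤ c ∧ ∀ d ∈ ds, d ≤ c) := by
  induction ds generalizing M with
  | nil => simp
  | cons d rest ih =>
    simp only [List.foldl_cons, ih, List.mem_cons]
    constructor
    · rintro ⟨h1, h2⟩
      split_ifs at h1 with h
      · exact ⟨by omega, fun x hx => by rcases hx with rfl | hx; omega; exact h2 x hx⟩
      · exact ⟨h1, fun x hx => by rcases hx with rfl | hx; omega; exact h2 x hx⟩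
    · rintro ⟨h1, h2⟩
      refine ⟨?_, fun x hx => h2 x (Or.inr hx)⟩
      have := h2 d (Or.inl rfl)
      split_ifs <;> omega

theorem helper_spec : Claim_equal_helper := by
  intro arr _
  unfold Spec_helper helper helper_alt
  by_cases hlen : arr.length ≤ 1
  · simp [hlen]
  · rw [if_neg hlen, if_neg hlen]
    -- arr has at least two elements
    obtain ⟨a, b, t, rfl⟩ : ∃ a b t, arr = a :: b :: t := by
      rcases arr with _ | ⟨a, t⟩
      · simp at hlen
      rcases t with _ | ⟨b, t⟩
      · simp at hlen
      exact ⟨a, b, t, rfl⟩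
    set L := a :: b :: t with hL
    have hd0 : PySem.List.pyGetD L 1 0 - PySem.List.pyGetD L 0 0 = b - a := by
      simp [hL, PySem.List.pyGetD]
    -- B side: slices, fold, bounds
    have hs1 : PySem.List.slice L (some 1) none = L.tail := PySem.List.slice_from_one L
    have hs2 : PySem.List.slice L (some 2) none = L.drop 2 := by
      have : (2 : Int) = ((2 : Nat) : Int) := by norm_num
      rw [this, PySem.List.slice_from_natCast]
    have hzip : L.tail.zip (L.drop 2) = L.tail.zip L.tail.tail := by
      simp [hL]
    have hmapzip : (L.tail.zip L.tail.tail).map (fun ab => ab.2 - ab.1) = pvZd L.tail := rfl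
    -- A side reduced to an all-check over the zip diff list
    have hD : pvZd L = (b - a) :: pvZd L.tail := rfl
    have hmem0 : (b - a) ∈ pvZd L := by rw [hD]; exact List.mem_cons_self
    rw [helperLoop_eq_all, hd0]
    rw [show ((PySem.List.pyRange 1 (L.length : Int) 1).all fun i =>
          (!(decide (0 < b - a) ^^ decide (0 < pvDiff L i))) &&
          (decide (1 ≤ |pvDiff L i|) && decide (|pvDiff L i| ≤ 3)))
        = ((PySem.List.pyRange 1 (L.length : Int) 1).map (pvDiff L)).all (fun d =>
          (!(decide (0 < b - a) ^^ decide (0 < d))) &&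
          (decide (1 ≤ |d|) && decide (|d| ≤ 3))) by rw [List.all_map]; rfl]
    rw [diffs_eq]
    simp only [hs1, hs2, hzip, foldl_minmax, hmapzip]
    -- now pure logic on the list pvZd L = (b-a) :: pvZd L.tail
    by_cases hpos : 0 < b - a
    · rw [show decide (0 < b - a) = true from decide_eq_true hpos]
      have hall : ∀ d : Int, ((!(true ^^ decide (0 < d))) && (decide (1 ≤ |d|) && decide (|d| ≤ 3)))
          = (decide (1 ≤ d) && decide (d ≤ 3)) := by
        intro d
        apply Bool.eq_iff_iff.mpr
        simp only [Bool.and_eq_true, Bool.true_xor, Bool.not_not, decide_eq_true_eq]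
        rcases abs_cases d with ⟨ha, _⟩ | ⟨ha, _⟩ <;> rw [ha] <;> omega
      rw [List.all_congr rfl (fun d => hall d)]
      by_cases hOK : ∀ d ∈ pvZd L, 1 ≤ d ∧ d ≤ 3
      · have hA : (pvZd L).all (fun d => decide (1 ≤ d) && decide (d ≤ 3)) = true := by
          rw [List.all_eq_true]; intro d hd; simp [hOK d hd]
        rw [hA]
        have hmn : 1 ≤ b - a ∧ ∀ d ∈ pvZd L.tail, 1 ≤ d := by
          refine ⟨(hOK _ hmem0).1, fun d hd => (hOK d (by rw [hD]; exact List.mem_cons_of_mem _ hd)).1⟩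
        have hmx : b - a ≤ 3 ∧ ∀ d ∈ pvZd L.tail, d ≤ 3 := by
          refine ⟨(hOK _ hmem0).2, fun d hd => (hOK d (by rw [hD]; exact List.mem_cons_of_mem _ hd)).2⟩
        rw [if_pos (Or.inl ⟨(le_foldl_min _ _ _).mpr ⟨hmn.1, hmn.2⟩,
              (foldl_max_le _ _ _).mpr ⟨hmx.1, hmx.2⟩⟩)]
        simp
      · push Not at hOK
        obtain ⟨d, hd, hbad⟩ := hOK
        have hA : (pvZd L).all (fun d => decide (1 ≤ d) && decide (d ≤ 3)) = false := by
          rw [List.all_eq_false]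
          exact ⟨d, hd, by by_cases h1 : 1 ≤ d <;> simp [h1]; omega⟩
        rw [hA]
        have hnotB : ¬ ((1 ≤ (pvZd L.tail).foldl (fun m d => if d < m then d else m) (b - a) ∧
              (pvZd L.tail).foldl (fun M d => if d > M then d else M) (b - a) ≤ 3) ∨
            (-3 ≤ (pvZd L.tail).foldl (fun m d => if d < m then d else m) (b - a) ∧
              (pvZd L.tail).foldl (fun M d => if d > M then d else M) (b - a) ≤ -1)) := by
          rw [le_foldl_min, foldl_max_le, le_foldl_min, foldl_max_le]
          rintro (⟨⟨h1, h2⟩, ⟨h3, h4⟩⟩ | ⟨⟨h1, h2⟩, ⟨h3, h4⟩⟩)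
          · rcases (List.mem_cons.mp (hD ▸ hd)) with rfl | hdt
            · have := hbad h1; omega
            · have := hbad (h2 d hdt); have := h4 d hdt; omega
          · omega
        rw [if_neg hnotB]
        simp
    · rw [show decide (0 < b - a) = false from decide_eq_false hpos]
      have hall : ∀ d : Int, ((!(false ^^ decide (0 < d))) && (decide (1 ≤ |d|) && decide (|d| ≤ 3)))
          = (decide (-3 ≤ d) && decide (d ≤ -1)) := by
        intro d
        apply Bool.eq_iff_iff.mpr
        simp only [Bool.and_eq_true, Bool.false_xor, Bool.not_eq_eq_eq_not, Bool.not_true,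
          decide_eq_true_eq, decide_eq_false_iff_not, not_lt]
        rcases abs_cases d with ⟨ha, _⟩ | ⟨ha, _⟩ <;> rw [ha] <;> omega
      rw [List.all_congr rfl (fun d => hall d)]
      by_cases hOK : ∀ d ∈ pvZd L, -3 ≤ d ∧ d ≤ -1
      · have hA : (pvZd L).all (fun d => decide (-3 ≤ d) && decide (d ≤ -1)) = true := by
          rw [List.all_eq_true]; intro d hd; simp [hOK d hd]
        rw [hA]
        have hmn : -3 ≤ b - a ∧ ∀ d ∈ pvZd L.tail, -3 ≤ d := by
          refine ⟨(hOK _ hmem0).1, fun d hd => (hOK d (by rw [hD]; exact List.mem_cons_of_mem _ hd)).1⟩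
        have hmx : b - a ≤ -1 ∧ ∀ d ∈ pvZd L.tail, d ≤ -1 := by
          refine ⟨(hOK _ hmem0).2, fun d hd => (hOK d (by rw [hD]; exact List.mem_cons_of_mem _ hd)).2⟩
        rw [if_pos (Or.inr ⟨(le_foldl_min _ _ _).mpr ⟨hmn.1, hmn.2⟩,
              (foldl_max_le _ _ _).mpr ⟨hmx.1, hmx.2⟩⟩)]
        simp
      · push Not at hOK
        obtain ⟨d, hd, hbad⟩ := hOK
        have hA : (pvZd L).all (fun d => decide (-3 ≤ d) && decide (d ≤ -1)) = false := by
          rw [List.all_eq_false]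
          exact ⟨d, hd, by by_cases h1 : -3 ≤ d <;> simp [h1]; omega⟩
        rw [hA]
        have hnotB : ¬ ((1 ≤ (pvZd L.tail).foldl (fun m d => if d < m then d else m) (b - a) ∧
              (pvZd L.tail).foldl (fun M d => if d > M then d else M) (b - a) ≤ 3) ∨
            (-3 ≤ (pvZd L.tail).foldl (fun m d => if d < m then d else m) (b - a) ∧
              (pvZd L.tail).foldl (fun M d => if d > M then d else M) (b - a) ≤ -1)) := by
          rw [le_foldl_min, foldl_max_le, le_foldl_min, foldl_max_le]
          rintro (⟨⟨h1, h2⟩, ⟨h3, h4⟩⟩ | ⟨⟨h1, h2⟩, ⟨h3, h4⟩⟩)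
          · omega
          · rcases (List.mem_cons.mp (hD ▸ hd)) with rfl | hdt
            · have := hbad h1; omega
            · have := hbad (h2 d hdt); have := h4 d hdt; omega
        rw [if_neg hnotB]
        simp
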